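-- pv_equiv track=rewrite | github.com/saramiyer/Programs | Information Tabulation/tabulate.py | getCallCount
-- ===== SOURCE A (Python) =====
-- def getCallCount(customerList, callList):
--
--    # Create a dictionary to keep track of customers and count.
--    numberCount = {}
--
--    # Take phone numbers in customer list and append to dictionary key
--    for customerLine in customerList:
--       numberCount[customerLine[0]] = 0
--
--    # Loop to search for caller phone numbers in call list
--    for line in callList:
--
--       # Every time a number in the list is found, increase count by 1
--       if line[1] in numberCount.keys():
--          numberCount[line[1]] += 1
--
--    # Return dictionary of call counts
--    return numberCount
-- ===== SOURCE B (Python) =====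
-- def getCallCount(customerList, callList):
--    # No counting dict at all: extract the caller numbers once, then for each
--    # customer row count its occurrences directly by scanning that list.
--    calls = [line[1] for line in callList]
--    result = {}
--    for customerLine in customerList:
--       result[customerLine[0]] = calls.count(customerLine[0])
--    return result
-- ===== Notes on version B (the rewrite author's own statement) =====
-- stated objective: alternative
-- what changed: B keeps no counting dictionary: it extracts the list of caller numbers once and answers each customer by counting that number's occurrences with list.count, trading A's seeded-dict guarded-increment pass over callList for a per-customer scan.
import Mathlib
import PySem

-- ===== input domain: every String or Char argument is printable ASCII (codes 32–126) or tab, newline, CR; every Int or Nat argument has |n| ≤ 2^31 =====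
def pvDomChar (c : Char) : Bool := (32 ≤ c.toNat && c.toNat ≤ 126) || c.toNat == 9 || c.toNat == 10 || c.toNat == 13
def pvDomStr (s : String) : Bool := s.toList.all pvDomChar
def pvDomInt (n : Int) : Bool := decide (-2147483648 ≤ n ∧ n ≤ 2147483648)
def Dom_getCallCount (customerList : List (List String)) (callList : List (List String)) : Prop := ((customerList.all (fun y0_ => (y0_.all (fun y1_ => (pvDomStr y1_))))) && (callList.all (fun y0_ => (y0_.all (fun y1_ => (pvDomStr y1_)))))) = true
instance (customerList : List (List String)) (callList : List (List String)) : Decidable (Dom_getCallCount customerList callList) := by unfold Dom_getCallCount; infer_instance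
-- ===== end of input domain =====

-- B keeps no counting dictionary: it extracts the caller numbers once and answers
-- each customer by counting occurrences with list.count (alternative decomposition).

-- ===== PORT A =====
-- seed a dict with 0 for each customer number, then a membership-guarded increment per call
def getCallCount (customerList : List (List String)) (callList : List (List String)) : List (String × Int) :=
  let numberCount : PySem.Dict String Int :=
    customerList.foldl (fun d customerLine => d.insert (PySem.List.pyGetD customerLine 0 "") 0)
      PySem.Dict.empty
  let numberCount :=
    callList.foldl (fun d line =>
      let k := PySem.List.pyGetD line 1 ""
      if d.contains k then d.modify k 0 (· + 1) else d) numberCount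
  numberCount.items

-- ===== PORT B =====
def getCallCount_alt (customerList : List (List String)) (callList : List (List String)) : List (String × Int) :=
  let calls : List String := callList.map (fun line => PySem.List.pyGetD line 1 "")
  (customerList.foldl (fun d customerLine =>
      let k := PySem.List.pyGetD customerLine 0 ""
      d.insert k ((PySem.List.count calls k : Int))) PySem.Dict.empty).items

-- ===== PRECONDITION & SPEC =====
-- Pre_ excludes exactly the inputs where A raises IndexError: an empty customer row
-- (customerLine[0]) or a call row with fewer than two fields (line[1]).
def Pre_getCallCount (customerList : List (List String)) (callList : List (List String)) : Prop :=
  (∀ c ∈ customerList, c ≠ []) ∧ (∀ l ∈ callList, 2 ≤ l.length)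
instance (customerList : List (List String)) (callList : List (List String)) : Decidable (Pre_getCallCount customerList callList) := by unfold Pre_getCallCount; infer_instance
def pvWitness_getCallCount : List (List String) × List (List String) :=
  ([["555", "Ann"], ["777", "Bob"], ["555", "Ann"]], [["x", "555"], ["y", "123"], ["z", "555"]])

def Spec_getCallCount (customerList : List (List String)) (callList : List (List String)) (out : List (String × Int)) : Prop := out = getCallCount_alt customerList callList
instance (customerList : List (List String)) (callList : List (List String)) (out : List (String × Int)) : Decidable (Spec_getCallCount customerList callList out) := by unfold Spec_getCallCount; infer_instance

-- ===== CLAIM (what is proved, stated in full; the proofs are below) =====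
def Claim_equal_getCallCount : Prop := ∀ (customerList : List (List String)) (callList : List (List String)), Dom_getCallCount customerList callList → Pre_getCallCount customerList callList → Spec_getCallCount customerList callList (getCallCount customerList callList)

-- ===== LEMMAS AND PROOFS =====

-- keys are preserved by A's guarded increment loop
theorem keys_incLoop (ll : List (List String)) (d : PySem.Dict String Int) :
    (ll.foldl (fun d line =>
      let k := PySem.List.pyGetD line 1 ""
      if d.contains k then d.modify k 0 (· + 1) else d) d).keys = d.keys := by
  induction ll generalizing d with
  | nil => rfl
  | cons l rest ih =>
    simp only [List.foldl_cons]
    by_cases h : d.contains (PySem.List.pyGetD l 1 "") = true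
    · rw [if_pos h, ih, PySem.Dict.keys_modify, PySem.Dict.keys_insert_of_contains _ _ h]
    · rw [if_neg h, ih]

-- value at k after A's guarded increment loop, for k already present
theorem getD_incLoop (ll : List (List String)) (d : PySem.Dict String Int) (k : String)
    (hk : d.contains k = true) :
    (ll.foldl (fun d line =>
      let k := PySem.List.pyGetD line 1 ""
      if d.contains k then d.modify k 0 (· + 1) else d) d).getD k 0
      = d.getD k 0 + ((ll.map (fun l => PySem.List.pyGetD l 1 "")).count k : Int) := by
  induction ll generalizing d with
  | nil => simp
  | cons l rest ih =>
    simp only [List.foldl_cons, List.map_cons, List.count_cons]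
    by_cases h : d.contains (PySem.List.pyGetD l 1 "") = true
    · have hc : (d.modify (PySem.List.pyGetD l 1 "") 0 (· + 1)).contains k = true := by
        rw [PySem.Dict.contains_modify]; simp [hk]
      rw [if_pos h, ih _ hc, PySem.Dict.getD_modify]
      by_cases he : k = PySem.List.pyGetD l 1 ""
      · simp only [he, beq_self_eq_true, if_true]
        push_cast; ring
      · have : ¬ (PySem.List.pyGetD l 1 "" == k) = true := by
          simp [beq_iff_eq]; exact fun hh => he hh.symm
        simp [he, this]
    · rw [if_neg h, ih _ hk]
      have hne : ¬ (PySem.List.pyGetD l 1 "" == k) = true := by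
        simp [beq_iff_eq]; intro hh; rw [hh, hk] at h; exact h rfl
      simp [hne]

-- every value in A's seeding loop is 0
theorem getD_seed (cl : List (List String)) (d : PySem.Dict String Int)
    (hd : ∀ k, d.getD k 0 = 0) (k : String) :
    (cl.foldl (fun d customerLine => d.insert (PySem.List.pyGetD customerLine 0 "") 0) d).getD k 0 = 0 := by
  induction cl generalizing d with
  | nil => exact hd k
  | cons c rest ih =>
    simp only [List.foldl_cons]
    refine ih _ (fun k' => ?_)
    rw [PySem.Dict.getD_insert]
    split_ifs with h
    · rfl
    · exact hd k'

-- value at k after B's building loop, for an arbitrary value function f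
theorem getD_buildLoop (f : String → Int) (cl : List (List String))
    (d : PySem.Dict String Int) (k : String) :
    (cl.foldl (fun d line => d.insert (PySem.List.pyGetD line 0 "") (f (PySem.List.pyGetD line 0 ""))) d).getD k 0
      = if k ∈ cl.map (fun c => PySem.List.pyGetD c 0 "") then f k else d.getD k 0 := by
  induction cl generalizing d with
  | nil => simp
  | cons c rest ih =>
    simp only [List.foldl_cons, List.map_cons, List.mem_cons]
    rw [ih]
    by_cases hr : k ∈ rest.map (fun c => PySem.List.pyGetD c 0 "")
    · simp [hr]
    · by_cases he : k = PySem.List.pyGetD c 0 ""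
      · simp [he]
      · simp [hr, he, PySem.Dict.getD_insert]

theorem getCallCount_spec_aux (customerList callList : List (List String)) :
    getCallCount customerList callList = getCallCount_alt customerList callList := by
  unfold getCallCount getCallCount_alt
  dsimp only
  set key0 : List String → String := fun c => PySem.List.pyGetD c 0 "" with hkey0
  set key1 : List String → String := fun l => PySem.List.pyGetD l 1 "" with hkey1
  set d0 : PySem.Dict String Int :=
    customerList.foldl (fun d c => d.insert (key0 c) 0) PySem.Dict.empty with hd0
  set dA : PySem.Dict String Int :=
    callList.foldl (fun d l => if d.contains (key1 l) then d.modify (key1 l) 0 (· + 1) else d) d0 with hdA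
  set dB : PySem.Dict String Int :=
    customerList.foldl (fun d c => d.insert (key0 c) ((PySem.List.count (callList.map key1) (key0 c) : Int))) PySem.Dict.empty with hdB
  have hkeysA : dA.keys = PySem.Set.ofList (customerList.map key0) := by
    rw [hdA, hkey1]
    rw [keys_incLoop, hd0, PySem.Dict.keys_foldl_insert_key]
    simp [PySem.Dict.keys_empty, PySem.Set.update_nil_left]
  have hkeysB : dB.keys = PySem.Set.ofList (customerList.map key0) := by
    rw [hdB, PySem.Dict.keys_foldl_insert_key]
    simp [PySem.Dict.keys_empty, PySem.Set.update_nil_left]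
  have hndA : dA.keys.Nodup := by
    rw [hkeysA]; exact PySem.Set.nodup_ofList _
  have hndB : dB.keys.Nodup := by
    rw [hkeysB]; exact PySem.Set.nodup_ofList _
  have hval : ∀ k ∈ dA.keys, dA.getD k 0 = dB.getD k 0 := by
    intro k hk
    have hkmem : k ∈ customerList.map key0 := by
      rw [hkeysA, PySem.Set.mem_ofList] at hk; exact hk
    have hc : d0.contains k = true := by
      rw [PySem.Dict.contains_eq_decide_mem_keys, hd0, PySem.Dict.keys_foldl_insert_key]
      simp [PySem.Dict.keys_empty, PySem.Set.update_nil_left, PySem.Set.mem_ofList]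
      exact List.mem_map.mp hkmem
    rw [hdA, hkey1, getD_incLoop _ _ _ hc, hd0, hkey0,
      getD_seed _ _ (fun k' => by simp), hdB, hkey0,
      getD_buildLoop (fun k => ((PySem.List.count (callList.map key1) k : Int)))]
    rw [hkey0] at hkmem
    simp only [hkmem, if_true, hkey1, PySem.List.count]
    ring
  rw [PySem.Dict.items_eq_map_keys dA hndA 0, PySem.Dict.items_eq_map_keys dB hndB 0,
    hkeysA, hkeysB]
  refine List.map_congr_left (fun k hk => ?_)
  have hk' : k ∈ dA.keys := by rw [hkeysA]; exact hk
  rw [hval k hk']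

-- ===== VERDICT (by name: the statement is the Claim_ definition above) =====
theorem getCallCount_spec : Claim_equal_getCallCount := by
  intro customerList callList _ _
  exact getCallCount_spec_aux customerList callList
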